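-- pv_equiv track=rewrite | github.com/Worthy-Programmer/LeetCode | educational_29_12_2025/snowman.py | find_valid_shifts
-- ===== SOURCE A (Python) =====
-- def find_valid_shifts(n, a, b):
--     extended_b = b * 2
--     valid_count = 0
--     for k in range(n):  # k = shifts
--         is_valid = True
--         for i in range(n):
--             if a[i] >= extended_b[k+i]:
--                 is_valid = False
--                 break
--         if is_valid:valid_count +=1
--     return valid_count
-- ===== SOURCE B (Python) =====
-- def find_valid_shifts(n, a, b):
--     m = len(b)
--     killed = set()
--     for i in range(n):
--         ai = a[i]
--         for j, bj in enumerate(b):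
--             if ai >= bj:
--                 k = (j - i) % m
--                 if k < n:
--                     killed.add(k)
--     return sum(1 for k in range(n) if k not in killed)
-- ===== Notes on version B (the rewrite author's own statement) =====
-- stated objective: alternative
-- what changed: Replaces A's per-shift validity scan with early break over extended_b=b*2 by a single (i,j) double loop that marks each invalidated shift (j-i)%len(b) in a set and then counts the shifts in range(n) not marked.
-- outside the precondition, e.g. on find_valid_shifts(2, [5], [1, 1]): A returns 0, B raises IndexError
import Mathlib
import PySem

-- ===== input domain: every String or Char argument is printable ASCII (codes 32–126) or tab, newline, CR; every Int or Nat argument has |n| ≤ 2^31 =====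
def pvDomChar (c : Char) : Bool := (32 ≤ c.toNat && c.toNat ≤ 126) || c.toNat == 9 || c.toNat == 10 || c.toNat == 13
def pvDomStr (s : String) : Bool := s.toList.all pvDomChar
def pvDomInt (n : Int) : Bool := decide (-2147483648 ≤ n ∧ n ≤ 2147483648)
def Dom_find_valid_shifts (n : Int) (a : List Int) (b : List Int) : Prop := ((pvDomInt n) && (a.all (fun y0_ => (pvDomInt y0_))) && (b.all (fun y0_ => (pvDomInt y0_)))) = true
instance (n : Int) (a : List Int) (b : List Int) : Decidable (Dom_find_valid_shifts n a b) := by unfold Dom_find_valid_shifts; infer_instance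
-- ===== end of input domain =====

-- B replaces A's per-shift validity scan (with early break) by a single double loop that
-- marks each invalidated shift (j - i) % m in a set, then counts the unmarked shifts
-- (objective: alternative decomposition, same asymptotic cost).

-- ===== PORT A =====
-- inner 'for i in range(n): if a[i] >= extended_b[k+i]: is_valid = False; break'
def fvsInner (a : List Int) (eb : List Int) (k : Int) : List Int → Bool
  | [] => true
  | i :: rest =>
    if PySem.List.pyGetD a i 0 ≥ PySem.List.pyGetD eb (k + i) 0 then false
    else fvsInner a eb k rest

def find_valid_shifts (n : Int) (a : List Int) (b : List Int) : Int :=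
  let extended_b := b ++ b
  (PySem.List.pyRange 0 n 1).foldl
    (fun valid_count k =>
      if fvsInner a extended_b k (PySem.List.pyRange 0 n 1) then valid_count + 1
      else valid_count) 0

-- ===== PORT B =====
-- body of B's inner loop: 'if ai >= bj: k = (j - i) % m; if k < n: killed.add(k)'
def fvsKillStep (n m ai i : Int) (killed : PySem.Set Int) (p : Int × Int) : PySem.Set Int :=
  if ai ≥ p.2 then
    let k := PySem.Int.mod (p.1 - i) m
    if k < n then PySem.Set.add killed k else killed
  else killed

def fvsKilled (n : Int) (a b : List Int) (m : Int) : PySem.Set Int :=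
  (PySem.List.pyRange 0 n 1).foldl
    (fun killed i =>
      let ai := PySem.List.pyGetD a i 0
      (PySem.List.enumerate b).foldl (fvsKillStep n m ai i) killed)
    PySem.Set.empty

def find_valid_shifts_alt (n : Int) (a : List Int) (b : List Int) : Int :=
  let m : Int := b.length
  let killed := fvsKilled n a b m
  (PySem.List.pyRange 0 n 1).foldl
    (fun acc k => if PySem.Set.contains killed k then acc else acc + 1) 0

-- ===== PRECONDITION & SPEC =====
-- Pre_ excludes the inputs on which the index accesses a[i] / extended_b[k+i] can raise
-- IndexError (n > len(a) or n > len(b)); on a few such inputs A happens to return anyway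
-- because its early break fires before the out-of-range access (cited in claim.json).
def Pre_find_valid_shifts (n : Int) (a : List Int) (b : List Int) : Prop :=
  n ≤ (a.length : Int) ∧ n ≤ (b.length : Int)
instance (n : Int) (a : List Int) (b : List Int) : Decidable (Pre_find_valid_shifts n a b) := by
  unfold Pre_find_valid_shifts; infer_instance
def pvWitness_find_valid_shifts : Int × List Int × List Int := (2, ([1, 2], [3, 3]))

def Spec_find_valid_shifts (n : Int) (a : List Int) (b : List Int) (out : Int) : Prop := out = find_valid_shifts_alt n a b
instance (n : Int) (a : List Int) (b : List Int) (out : Int) : Decidable (Spec_find_valid_shifts n a b out) := by unfold Spec_find_valid_shifts; infer_instance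

-- ===== CLAIM (what is proved, stated in full; the proofs are below) =====
def Claim_equal_find_valid_shifts : Prop := ∀ (n : Int) (a : List Int) (b : List Int), Dom_find_valid_shifts n a b → Pre_find_valid_shifts n a b → Spec_find_valid_shifts n a b (find_valid_shifts n a b)

-- ===== LEMMAS AND PROOFS =====

lemma fvsInner_eq_all (a eb : List Int) (k : Int) (is : List Int) :
    fvsInner a eb k is
      = is.all (fun i => decide (PySem.List.pyGetD a i 0 < PySem.List.pyGetD eb (k + i) 0)) := by
  induction is with
  | nil => rfl
  | cons x t ih =>
    simp only [fvsInner, List.all_cons]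
    by_cases h : PySem.List.pyGetD a x 0 ≥ PySem.List.pyGetD eb (k + x) 0
    · simp [h, not_lt.mpr h]
    · simp [h, lt_of_not_ge h, ih]

lemma mem_killStep_foldl (n m ai i : Int) (l : List (Int × Int)) (s : PySem.Set Int) (x : Int) :
    (x ∈ l.foldl (fvsKillStep n m ai i) s) ↔
      x ∈ s ∨ ∃ p ∈ l, ai ≥ p.2 ∧ PySem.Int.mod (p.1 - i) m < n ∧ PySem.Int.mod (p.1 - i) m = x := by
  induction l generalizing s with
  | nil => simp
  | cons p t ih =>
    simp only [List.foldl_cons, ih, List.mem_cons]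
    unfold fvsKillStep
    by_cases h1 : ai ≥ p.2
    · by_cases h2 : PySem.Int.mod (p.1 - i) m < n
      · simp only [h1, h2, if_pos, PySem.Set.mem_add]
        constructor
        · rintro (((hs | he) | ⟨q, hq, hc⟩))
          · exact Or.inl hs
          · exact Or.inr ⟨p, Or.inl rfl, h1, h2, he.symm⟩
          · exact Or.inr ⟨q, Or.inr hq, hc⟩
        · rintro (hs | ⟨q, (rfl | hq), hc⟩)
          · exact Or.inl (Or.inl hs)
          · exact Or.inl (Or.inr hc.2.2.symm)
          · exact Or.inr ⟨q, hq, hc⟩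
      · simp only [h1, h2, if_pos]
        constructor
        · rintro (hs | ⟨q, hq, hc⟩)
          · exact Or.inl hs
          · exact Or.inr ⟨q, Or.inr hq, hc⟩
        · rintro (hs | ⟨q, (rfl | hq), hc⟩)
          · exact Or.inl hs
          · exact absurd hc.2.1 h2
          · exact Or.inr ⟨q, hq, hc⟩
    · simp only [h1]
      constructor
      · rintro (hs | ⟨q, hq, hc⟩)
        · exact Or.inl hs
        · exact Or.inr ⟨q, Or.inr hq, hc⟩
      · rintro (hs | ⟨q, (rfl | hq), hc⟩)
        · exact Or.inl hs
        · exact absurd hc.1 h1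
        · exact Or.inr ⟨q, hq, hc⟩

lemma mem_killed_aux (n m : Int) (a b : List Int) (is : List Int) (s : PySem.Set Int) (x : Int) :
    (x ∈ is.foldl
        (fun killed i =>
          let ai := PySem.List.pyGetD a i 0
          (PySem.List.enumerate b).foldl (fvsKillStep n m ai i) killed) s) ↔
      x ∈ s ∨ ∃ i ∈ is, ∃ p ∈ PySem.List.enumerate b 0,
        PySem.List.pyGetD a i 0 ≥ p.2 ∧ PySem.Int.mod (p.1 - i) m < n ∧ PySem.Int.mod (p.1 - i) m = x := by
  induction is generalizing s with
  | nil => simp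
  | cons i t ih =>
    simp only [List.foldl_cons, ih, List.mem_cons, mem_killStep_foldl]
    constructor
    · rintro ((hs | ⟨p, hp, hc⟩) | ⟨j, hj, hrest⟩)
      · exact Or.inl hs
      · exact Or.inr ⟨i, Or.inl rfl, p, hp, hc⟩
      · exact Or.inr ⟨j, Or.inr hj, hrest⟩
    · rintro (hs | ⟨j, (rfl | hj), hrest⟩)
      · exact Or.inl (Or.inl hs)
      · exact Or.inl (Or.inr hrest)
      · exact Or.inr ⟨j, hj, hrest⟩

lemma mem_killed (n m : Int) (a b : List Int) (x : Int) :
    (x ∈ fvsKilled n a b m) ↔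
      ∃ i ∈ PySem.List.pyRange 0 n 1, ∃ p ∈ PySem.List.enumerate b 0,
        PySem.List.pyGetD a i 0 ≥ p.2 ∧ PySem.Int.mod (p.1 - i) m < n ∧ PySem.Int.mod (p.1 - i) m = x := by
  rw [fvsKilled, mem_killed_aux]
  simp [PySem.Set.empty]

lemma A_eq_countP (n : Int) (a b : List Int) :
    find_valid_shifts n a b
      = ((PySem.List.pyRange 0 n 1).countP
          (fun k => fvsInner a (b ++ b) k (PySem.List.pyRange 0 n 1)) : Int) := by
  simp only [find_valid_shifts]
  rw [PySem.List.foldl_if_add_one]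
  simp

lemma B_eq_countP (n : Int) (a b : List Int) :
    find_valid_shifts_alt n a b
      = ((PySem.List.pyRange 0 n 1).countP
          (fun k => !PySem.Set.contains (fvsKilled n a b (b.length : Int)) k) : Int) := by
  simp only [find_valid_shifts_alt]
  have : ∀ (acc k : Int),
      (if PySem.Set.contains (fvsKilled n a b (b.length : Int)) k then acc else acc + 1)
        = (if (!PySem.Set.contains (fvsKilled n a b (b.length : Int)) k) then acc + 1 else acc) := by
    intro acc k
    cases h : PySem.Set.contains (fvsKilled n a b (b.length : Int)) k
    · simp
    · simp
  calc (PySem.List.pyRange 0 n 1).foldl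
        (fun acc k => if PySem.Set.contains (fvsKilled n a b (b.length : Int)) k then acc else acc + 1) (0 : Int)
      = (PySem.List.pyRange 0 n 1).foldl
        (fun acc k => if (!PySem.Set.contains (fvsKilled n a b (b.length : Int)) k) then acc + 1 else acc) (0 : Int) := by
        apply PySem.List.foldl_congr_mem
        intro acc x _
        exact this acc x
    _ = _ := by rw [PySem.List.foldl_if_add_one]; simp

-- b[j] read through the doubled list: extended_b[t] = b[t % len(b)] for 0 ≤ t < 2·len(b)
lemma ebGet (b : List Int) (t : Int) (hm : 0 < (b.length : Int)) (h0 : 0 ≤ t)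
    (h2 : t < 2 * (b.length : Int)) :
    PySem.List.pyGetD (b ++ b) t 0 = b.getD (t % (b.length : Int)).toNat 0 := by
  rw [PySem.List.pyGetD_of_nonneg _ _ h0]
  by_cases h : t < (b.length : Int)
  · rw [Int.emod_eq_of_lt h0 h, List.getD_append b b 0 t.toNat (by omega)]
  · have hmod : t % (b.length : Int) = t - (b.length : Int) := by
      rw [← Int.sub_emod_right t (b.length : Int), Int.emod_eq_of_lt (by omega) (by omega)]
    rw [hmod]
    have h1 : t.toNat = b.length + (t - (b.length : Int)).toNat := by omega
    simp only [List.getD_eq_getElem?_getD, h1, List.getElem?_append_right (Nat.le_add_right _ _),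
      Nat.add_sub_cancel_left]

lemma bridge (n : Int) (a b : List Int) (hnb : n ≤ (b.length : Int)) (k : Int)
    (hk0 : 0 ≤ k) (hkn : k < n) (i : Int) (hi0 : 0 ≤ i) (hin : i < n) :
    (PySem.List.pyGetD a i 0 ≥ PySem.List.pyGetD (b ++ b) (k + i) 0) ↔
      ∃ p ∈ PySem.List.enumerate b 0,
        PySem.List.pyGetD a i 0 ≥ p.2 ∧ PySem.Int.mod (p.1 - i) (b.length : Int) < n ∧
          PySem.Int.mod (p.1 - i) (b.length : Int) = k := by
  have hm : 0 < (b.length : Int) := by omega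
  have heb : PySem.List.pyGetD (b ++ b) (k + i) 0
      = b.getD ((k + i) % (b.length : Int)).toNat 0 := ebGet b (k + i) hm (by omega) (by omega)
  constructor
  · intro h
    have hj0 : 0 ≤ (k + i) % (b.length : Int) := Int.emod_nonneg _ (by omega)
    have hjm : (k + i) % (b.length : Int) < (b.length : Int) := Int.emod_lt_of_pos _ hm
    have hjlen : ((k + i) % (b.length : Int)).toNat < b.length := by omega
    refine ⟨((k + i) % (b.length : Int), b[((k + i) % (b.length : Int)).toNat]), ?_, ?_, ?_, ?_⟩
    · rw [PySem.List.mem_enumerate_iff]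
      exact ⟨((k + i) % (b.length : Int)).toNat, hjlen, by simp; omega⟩
    · rw [heb] at h
      simpa [List.getD_eq_getElem?_getD, List.getElem?_eq_getElem hjlen] using h
    · have : PySem.Int.mod ((k + i) % (b.length : Int) - i) (b.length : Int) = k := by
        rw [PySem.Int.mod_eq_emod_of_pos hm, Int.sub_emod, Int.emod_emod_of_dvd _ dvd_rfl,
          ← Int.sub_emod, add_sub_cancel_right, Int.emod_eq_of_lt hk0 (by omega)]
      simp only [this]; omega
    · rw [PySem.Int.mod_eq_emod_of_pos hm, Int.sub_emod, Int.emod_emod_of_dvd _ dvd_rfl,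
        ← Int.sub_emod, add_sub_cancel_right, Int.emod_eq_of_lt hk0 (by omega)]
  · rintro ⟨p, hp, hge, _, heq⟩
    rw [PySem.List.mem_enumerate_iff] at hp
    obtain ⟨j, hjlen, rfl⟩ := hp
    simp only [zero_add] at hge heq ⊢
    rw [PySem.Int.mod_eq_emod_of_pos hm] at heq
    have hkj : (k + i) % (b.length : Int) = (j : Int) := by
      have h1 : ((j : Int) - i) % (b.length : Int) = k := heq
      calc (k + i) % (b.length : Int)
          = (((j : Int) - i) % (b.length : Int) + i) % (b.length : Int) := by rw [h1]
        _ = ((j : Int) - i + i) % (b.length : Int) := Int.emod_add_emod _ _ _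
        _ = (j : Int) % (b.length : Int) := by ring_nf
        _ = (j : Int) := Int.emod_eq_of_lt (by omega) (by omega)
    rw [heb, hkj]
    simpa [List.getD_eq_getElem?_getD, List.getElem?_eq_getElem hjlen] using hge

-- ===== VERDICT (by name: the statement is the Claim_ definition above) =====
theorem find_valid_shifts_spec : Claim_equal_find_valid_shifts := by
  intro n a b _ hpre
  obtain ⟨hna, hnb⟩ := hpre
  unfold Spec_find_valid_shifts
  rw [A_eq_countP, B_eq_countP]
  congr 1
  apply List.countP_congr
  intro k hk
  rw [PySem.List.mem_pyRange_one] at hk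
  simp only [fvsInner_eq_all, List.all_eq_true, Bool.not_eq_true', ← Bool.not_eq_true,
    PySem.Set.contains, List.contains_iff_mem, mem_killed]
  constructor
  · intro h hex
    obtain ⟨i, hi, hp⟩ := hex
    have hi' := PySem.List.mem_pyRange_one.mp hi
    have := h i hi
    rw [← bridge n a b hnb k hk.1 hk.2 i hi'.1 hi'.2] at hp
    simp only [decide_eq_true_eq] at this
    omega
  · intro h i hi
    have hi' := PySem.List.mem_pyRange_one.mp hi
    simp only [decide_eq_true_eq]
    by_contra hlt
    exact h ⟨i, hi, (bridge n a b hnb k hk.1 hk.2 i hi'.1 hi'.2).mp (by omega)⟩
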